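-- pv_equiv track=rewrite | github.com/zeyongj/LeetCode | 2286-minimum-time-to-remove-all-cars-containing-illegal-goods/2286-minimum-time-to-remove-all-cars-containing-illegal-goods.py | minimumTime
-- ===== SOURCE A (Python) =====
-- def minimumTime(s):
--     def minSum(nums):
--         dp, dp_min = nums[0], nums[0]
--         for i in range(1, len(nums)):
--             dp = min(nums[i], nums[i] + dp)
--             dp_min = min(dp, dp_min)
--         return min(0, dp_min)
--     return len(s) + minSum([1 if i == "1" else -1 for i in s])
-- ===== SOURCE B (Python) =====
-- def minimumTime(s):
--     # prefix-sum pass with a running maximum prefix, instead of A's Kadane recurrence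
--     n = len(s)
--     best = 0
--     p = 0
--     hi = 0
--     for c in s:
--         p += 1 if c == "1" else -1
--         best = min(best, p - hi)
--         hi = max(hi, p)
--     return n + best
-- ===== Notes on version B (the rewrite author's own statement) =====
-- stated objective: alternative
-- what changed: Replaces A's Kadane-style minimum-subarray recurrence (dp/dp_min over a mapped +1/-1 list) by a single prefix-sum pass that tracks the running prefix sum and its running maximum, taking best = min(best, p - hi).
import Mathlib
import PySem

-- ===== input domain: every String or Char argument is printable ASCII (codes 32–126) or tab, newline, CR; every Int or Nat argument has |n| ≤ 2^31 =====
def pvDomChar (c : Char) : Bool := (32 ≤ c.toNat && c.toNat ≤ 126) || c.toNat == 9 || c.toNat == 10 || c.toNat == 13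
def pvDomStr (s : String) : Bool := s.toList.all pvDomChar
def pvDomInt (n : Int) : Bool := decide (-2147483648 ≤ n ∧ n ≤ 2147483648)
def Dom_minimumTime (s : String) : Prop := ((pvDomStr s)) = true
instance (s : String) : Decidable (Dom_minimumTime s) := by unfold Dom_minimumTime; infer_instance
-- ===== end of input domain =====

-- B replaces A's Kadane dp/dp_min recurrence by a prefix-sum pass with a running maximum prefix
-- (alternative decomposition, same asymptotic cost); on the empty string A raises, B returns 0.

-- ===== PORT A =====
def minimumTime (s : String) : Int :=
  let nums := s.toList.map (fun c => if c == '1' then (1 : Int) else -1)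
  match nums with
  | [] => 0  -- Python raises IndexError here (nums[0]); excluded by Pre_minimumTime
  | x :: rest =>
    let st := rest.foldl
      (fun (q : Int × Int) y =>
        let dp := min y (y + q.1)
        (dp, min dp q.2)) (x, x)
    (s.toList.length : Int) + min 0 st.2

-- ===== PORT B =====
def minimumTime_alt (s : String) : Int :=
  let st := s.toList.foldl
    (fun (t : Int × Int × Int) c =>
      let p := t.2.1 + (if c == '1' then (1 : Int) else -1)
      (min t.1 (p - t.2.2), p, max t.2.2 p)) (0, 0, 0)
  (s.toList.length : Int) + st.1

-- ===== PRECONDITION & SPEC =====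
-- Pre_ excludes exactly the empty string, on which A raises IndexError.
def Pre_minimumTime (s : String) : Prop := s ≠ ""
instance (s : String) : Decidable (Pre_minimumTime s) := by unfold Pre_minimumTime; infer_instance
def pvWitness_minimumTime : String := "10"

def Spec_minimumTime (s : String) (out : Int) : Prop := out = minimumTime_alt s
instance (s : String) (out : Int) : Decidable (Spec_minimumTime s out) := by unfold Spec_minimumTime; infer_instance

-- ===== CLAIM (what is proved, stated in full; the proofs are below) =====
def Claim_equal_minimumTime : Prop := ∀ (s : String), Dom_minimumTime s → Pre_minimumTime s → Spec_minimumTime s (minimumTime s)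

-- ===== LEMMAS AND PROOFS =====

-- The two fold steps, on the already-mapped ±1 list.
def stepA (q : Int × Int) (y : Int) : Int × Int :=
  let dp := min y (y + q.1)
  (dp, min dp q.2)

def stepB (t : Int × Int × Int) (y : Int) : Int × Int × Int :=
  let p := t.2.1 + y
  (min t.1 (p - t.2.2), p, max t.2.2 p)

-- Invariant: B's best is min 0 of A's dp_min, and B's (p - hi) is min 0 of A's dp.
lemma inv_fold : ∀ (l : List Int) (dp dpmin best p hi : Int),
    p - hi = min 0 dp → best = min 0 dpmin →
    (l.foldl stepB (best, p, hi)).1 = min 0 (l.foldl stepA (dp, dpmin)).2 := by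
  intro l
  induction l with
  | nil => intro dp dpmin best p hi h1 h2; simpa using h2
  | cons y l ih =>
    intro dp dpmin best p hi h1 h2
    simp only [List.foldl_cons, stepA, stepB]
    exact ih _ _ _ _ _ (by omega) (by omega)

theorem minimumTime_spec : Claim_equal_minimumTime := by
  intro s _ hpre
  unfold Spec_minimumTime minimumTime minimumTime_alt
  have hne : s.toList ≠ [] := by
    intro h
    exact hpre (by simpa using congrArg String.ofList h)
  obtain ⟨c, rest, hcr⟩ := List.exists_cons_of_ne_nil hne
  rw [hcr]
  simp only [List.map_cons]
  have hB : (c :: rest).foldl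
      (fun (t : Int × Int × Int) c =>
        let p := t.2.1 + (if c == '1' then (1 : Int) else -1)
        (min t.1 (p - t.2.2), p, max t.2.2 p)) (0, 0, 0)
      = (rest.map (fun c => if c == '1' then (1 : Int) else -1)).foldl stepB
          (stepB (0, 0, 0) (if c == '1' then (1 : Int) else -1)) := by
    rw [List.foldl_cons, List.foldl_map]
    rfl
  have hA : ∀ x : Int, ∀ v : List Int,
      v.foldl (fun (q : Int × Int) y => let dp := min y (y + q.1); (dp, min dp q.2)) (x, x)
      = v.foldl stepA (x, x) := fun _ _ => rfl
  rw [hB, hA]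
  set x := (if c == '1' then (1 : Int) else -1) with hx
  have := inv_fold (rest.map (fun c => if c == '1' then (1 : Int) else -1))
      x x (min 0 x) x (max 0 x) (by omega) (by omega)
  have hstep : stepB (0, 0, 0) x = (min 0 x, x, max 0 x) := by
    simp [stepB]
  rw [hstep, this]
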